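-- pv_equiv track=rewrite | github.com/lcremer/Maya_Rigging | Utils/String.py | objGetPrefix
-- ===== SOURCE A (Python) =====
-- def objShortName(obj):
--     ret = ''
--     if obj == '':
--         return ret
--     parts = obj.split('|')
--     cnt = len(parts)
--
--     if cnt <= 0:
--         ret = obj
--     else:
--         ret = parts[cnt-1]
--
--     return ret
--
-- def objGetPrefix(obj):
--     ret = ''
--     if obj == '':
--         return ret
--
--     obj = objShortName(obj)
--
--     parts = obj.split('_')
--     cnt = len(parts)
--
--     if cnt <= 1:
--         ret = ''
--     else:
--         for i in range(cnt-1):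
--             if i > 0:
--                 ret += '_'
--             ret += parts[i]
--
--     return ret
-- ===== SOURCE B (Python) =====
-- def objGetPrefix(obj):
--     short = obj[obj.rfind('|') + 1:]
--     j = short.rfind('_')
--     return short[:j] if j != -1 else ''
-- ===== Notes on version B (the rewrite author's own statement) =====
-- stated objective: simpler
-- what changed: B replaces A's split-into-segment-lists plus an explicit rejoin loop with two right-to-left separator scans (rfind) and slices: the short name is the slice after the last '|' and the prefix is the slice before the last '_' (empty if none), materializing no intermediate lists.
import Mathlib
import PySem

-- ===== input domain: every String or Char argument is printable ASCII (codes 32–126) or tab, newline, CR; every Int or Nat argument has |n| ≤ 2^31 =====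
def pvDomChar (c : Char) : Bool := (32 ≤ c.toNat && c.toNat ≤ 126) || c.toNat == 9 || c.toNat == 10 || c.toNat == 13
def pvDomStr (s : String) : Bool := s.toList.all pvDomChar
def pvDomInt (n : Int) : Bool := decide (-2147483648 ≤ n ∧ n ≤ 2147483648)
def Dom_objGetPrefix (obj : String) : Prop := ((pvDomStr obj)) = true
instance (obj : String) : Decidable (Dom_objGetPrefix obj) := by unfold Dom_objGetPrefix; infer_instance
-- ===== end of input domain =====

-- B replaces A's split-into-lists-and-rejoin with two right-to-left scans (rfind) and slices; objective: simpler, same asymptotic cost.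

-- ===== PORT A =====
def objShortName (obj : String) : String :=
  if obj = "" then "" else
    let parts := PySem.Chars.splitOn obj.toList ['|']
    let cnt : Int := parts.length
    if cnt ≤ 0 then obj
    else String.ofList (PySem.List.pyGetD parts (cnt - 1) [])

def objGetPrefix (obj : String) : String :=
  if obj = "" then "" else
    let parts := PySem.Chars.splitOn (objShortName obj).toList ['_']
    let cnt : Int := parts.length
    if cnt ≤ 1 then ""
    else String.ofList ((PySem.List.pyRange 0 (cnt - 1) 1).foldl
      (fun ret i => (if 0 < i then ret ++ ['_'] else ret) ++ PySem.List.pyGetD parts i []) [])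

-- ===== PORT B =====
def objGetPrefix_alt (obj : String) : String :=
  let short := PySem.Chars.slice obj.toList (some (PySem.Chars.rfind obj.toList ['|'] + 1)) none
  let j := PySem.Chars.rfind short ['_']
  if j = -1 then "" else String.ofList (PySem.Chars.slice short none (some j))

-- ===== PRECONDITION & SPEC =====
def Spec_objGetPrefix (obj : String) (out : String) : Prop := out = objGetPrefix_alt obj
instance (obj : String) (out : String) : Decidable (Spec_objGetPrefix obj out) := by unfold Spec_objGetPrefix; infer_instance

-- ===== CLAIM (what is proved, stated in full; the proofs are below) =====
def Claim_equal_objGetPrefix : Prop := ∀ (obj : String), Dom_objGetPrefix obj → Spec_objGetPrefix obj (objGetPrefix obj)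

-- ===== LEMMAS AND PROOFS =====

/-- Simple structural model of Python's `s.split(c)` for a one-character separator. -/
def sp (c : Char) : List Char → List (List Char)
  | [] => [[]]
  | a :: rest =>
      if a = c then [] :: sp c rest
      else (a :: (sp c rest).headI) :: (sp c rest).tail

theorem sp_ne_nil (c : Char) (s : List Char) : sp c s ≠ [] := by
  cases s with
  | nil => simp [sp]
  | cons a rest => by_cases h : a = c <;> simp [sp, h]

theorem splitOn_go_eq (c : Char) :
    ∀ (fuel : Nat) (l cur : List Char) (acc : List (List Char)), l.length ≤ fuel →
      PySem.Chars.splitOn.go [c] fuel l cur acc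
        = acc.reverse ++ (cur.reverse ++ (sp c l).headI) :: (sp c l).tail := by
  intro fuel
  induction fuel with
  | zero =>
    intro l cur acc h
    have hl : l = [] := List.length_eq_zero_iff.mp (Nat.le_zero.mp h)
    subst hl
    simp [PySem.Chars.splitOn.go, sp]
  | succ f ih =>
    intro l cur acc h
    cases l with
    | nil => simp [PySem.Chars.splitOn.go, sp]
    | cons a rest =>
      rw [PySem.Chars.splitOn.go]
      by_cases hac : a = c
      · have hpre : List.isPrefixOf [c] (a :: rest) = true := by
          simp [List.isPrefixOf, hac]
        rw [if_pos hpre]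
        have := ih rest [] (cur.reverse :: acc) (by simpa using Nat.lt_succ_iff.mp (by simpa using h))
        simp only [List.length_cons, List.length_nil, List.drop_succ_cons, List.drop_zero] at this ⊢
        rw [this]
        obtain ⟨p, ps, hps⟩ : ∃ p ps, sp c rest = p :: ps := by
          cases hsp : sp c rest with
          | nil => exact absurd hsp (sp_ne_nil c rest)
          | cons p ps => exact ⟨p, ps, rfl⟩
        simp [sp, hac, hps]
      · have hpre : List.isPrefixOf [c] (a :: rest) = false := by
          simp [List.isPrefixOf]
          intro hca; exact absurd hca.symm hac
        rw [if_neg (by simp [hpre])]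
        have := ih rest (a :: cur) acc (by simpa using Nat.lt_succ_iff.mp (by simpa using h))
        rw [this]
        simp [sp, hac]

theorem splitOn_eq_sp (c : Char) (s : List Char) :
    PySem.Chars.splitOn s [c] = sp c s := by
  have h := splitOn_go_eq c (s.length + 1) s [] [] (Nat.le_succ _)
  rw [PySem.Chars.splitOn, h]
  obtain ⟨p, ps, hps⟩ : ∃ p ps, sp c s = p :: ps := by
    cases hsp : sp c s with
    | nil => exact absurd hsp (sp_ne_nil c s)
    | cons p ps => exact ⟨p, ps, rfl⟩
  simp [hps]

theorem rfind_nil (c : Char) : PySem.Chars.rfind [] [c] = -1 := by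
  simp [PySem.Chars.rfind, PySem.Chars.rfind.go, List.isPrefixOf]

theorem rfind_go_zero (s sub : List Char) :
    PySem.Chars.rfind.go s sub 0 = if sub.isPrefixOf s then 0 else -1 := by
  simp [PySem.Chars.rfind.go]

theorem rfind_go_succ (s sub : List Char) (j : Nat) :
    PySem.Chars.rfind.go s sub (j + 1)
      = if sub.isPrefixOf (s.drop (j + 1)) then ((j : Int) + 1) else PySem.Chars.rfind.go s sub j := by
  rw [PySem.Chars.rfind.go]; push_cast; rfl

theorem rfind_go_cons (c a : Char) (rest : List Char) :
    ∀ (k : Nat),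
      PySem.Chars.rfind.go (a :: rest) [c] (k + 1)
        = if PySem.Chars.rfind.go rest [c] k = -1 then (if a = c then (0 : Int) else -1)
          else PySem.Chars.rfind.go rest [c] k + 1 := by
  intro k
  induction k with
  | zero =>
    rw [rfind_go_succ, rfind_go_zero, rfind_go_zero]
    simp only [List.drop_succ_cons, List.drop_zero]
    by_cases hp : List.isPrefixOf [c] rest
    · simp [hp]
    · by_cases hac : a = c
      · subst hac
        have hpa : List.isPrefixOf [a] (a :: rest) = true := by simp [List.isPrefixOf]
        simp [hp, hpa]
      · have hpa : List.isPrefixOf [c] (a :: rest) = false := by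
          simp [List.isPrefixOf]
          intro hca; exact absurd hca.symm hac
        simp [hp, hpa, hac]
  | succ k ih =>
    rw [rfind_go_succ (a :: rest) [c] (k + 1), rfind_go_succ rest [c] k]
    simp only [List.drop_succ_cons]
    by_cases hp : List.isPrefixOf [c] (rest.drop (k + 1))
    · simp [hp]
      exact fun hk => absurd hk (by omega)
    · simp only [hp, Bool.false_eq_true, if_false, ih]

theorem rfind_cons (c a : Char) (rest : List Char) :
    PySem.Chars.rfind (a :: rest) [c]
      = if PySem.Chars.rfind rest [c] = -1 then (if a = c then (0 : Int) else -1)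
        else PySem.Chars.rfind rest [c] + 1 := by
  show PySem.Chars.rfind.go (a :: rest) [c] (rest.length + 1) = _
  rw [rfind_go_cons c a rest rest.length]; rfl

theorem join_cons_head (sep : List Char) (a : Char) (p : List Char) (X : List (List Char)) :
    PySem.Chars.join sep ((a :: p) :: X) = a :: PySem.Chars.join sep (p :: X) := by
  cases X with
  | nil => simp [PySem.Chars.join_singleton]
  | cons y ys => rw [PySem.Chars.join_cons_cons, PySem.Chars.join_cons_cons]; simp

theorem join_append_singleton (sep q : List Char) :
    ∀ (ps : List (List Char)), ps ≠ [] →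
      PySem.Chars.join sep (ps ++ [q]) = PySem.Chars.join sep ps ++ sep ++ q := by
  intro ps
  induction ps with
  | nil => intro h; exact absurd rfl h
  | cons p ps ih =>
    intro _
    cases ps with
    | nil => simp [PySem.Chars.join_cons_cons, PySem.Chars.join_singleton]
    | cons r rs =>
      have h2 : PySem.Chars.join sep (r :: (rs ++ [q]))
          = PySem.Chars.join sep (r :: rs) ++ sep ++ q := by
        simpa using ih (by simp)
      show PySem.Chars.join sep (p :: r :: (rs ++ [q]))
          = PySem.Chars.join sep (p :: r :: rs) ++ sep ++ q
      rw [PySem.Chars.join_cons_cons, h2, PySem.Chars.join_cons_cons]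
      simp [List.append_assoc]

theorem getLastD_default_irrel {α : Type} (ps : List α) (h : ps ≠ []) (d d' : α) :
    ps.getLastD d = ps.getLastD d' := by
  cases ps with
  | nil => exact absurd rfl h
  | cons x xs => rw [List.getLastD_cons, List.getLastD_cons]

/-- The last separator position (`rfind`) against the split model `sp`: either the
separator is absent and `sp` keeps the string whole, or `rfind` names an index `j`
such that joining all but the last piece is `take j` and the last piece is `drop (j+1)`. -/
theorem rfind_sp_main (c : Char) (s : List Char) :
    (PySem.Chars.rfind s [c] = -1 ∧ sp c s = [s])
    ∨ (∃ j : Nat, PySem.Chars.rfind s [c] = (j : Int) ∧ j + 1 ≤ s.length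
        ∧ 2 ≤ (sp c s).length
        ∧ PySem.Chars.join [c] ((sp c s).dropLast) = s.take j
        ∧ (sp c s).getLastD [] = s.drop (j + 1)) := by
  induction s with
  | nil => exact Or.inl ⟨rfind_nil c, rfl⟩
  | cons a rest ih =>
    rw [rfind_cons]
    rcases ih with ⟨hr, hs⟩ | ⟨j, hj, hlen, hlen2, hjoin, hlast⟩
    · by_cases hac : a = c
      · refine Or.inr ⟨0, ?_, by simp, ?_, ?_, ?_⟩
        · simp [hr, hac]
        · simp [sp, hac, hs]
        · simp [sp, hac, hs, PySem.Chars.join_singleton]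
        · simp [sp, hac, hs]
      · refine Or.inl ⟨?_, ?_⟩
        · simp [hr, hac]
        · simp [sp, hac, hs]
    · have hne : PySem.Chars.rfind rest [c] ≠ -1 := by rw [hj]; omega
      rw [if_neg hne, hj]
      obtain ⟨p, ps, hps⟩ : ∃ p ps, sp c rest = p :: ps := by
        cases hsp : sp c rest with
        | nil => exact absurd hsp (sp_ne_nil c rest)
        | cons p ps => exact ⟨p, ps, rfl⟩
      have hpsne : ps ≠ [] := by
        intro h; rw [hps, h] at hlen2; simp at hlen2
      by_cases hac : a = c
      · refine Or.inr ⟨j + 1, by push_cast; ring, by simpa using hlen, ?_, ?_, ?_⟩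
        · simp [sp, hac]; omega
        · have hdl : (sp c rest).dropLast ≠ [] := by
            intro h
            have := congrArg List.length h
            simp at this
            omega
          obtain ⟨y, ys, hyys⟩ : ∃ y ys, (sp c rest).dropLast = y :: ys := by
            cases hcase : (sp c rest).dropLast with
            | nil => exact absurd hcase hdl
            | cons y ys => exact ⟨y, ys, rfl⟩
          simp only [sp, if_pos hac]
          rw [List.dropLast_cons_of_ne_nil (sp_ne_nil c rest), hyys,
            PySem.Chars.join_cons_cons, ← hyys, hjoin]
          simp [hac, List.take_succ_cons]
        · simp only [sp, if_pos hac, List.getLastD_cons]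
          rw [hps] at hlast ⊢
          simpa using hlast
      · refine Or.inr ⟨j + 1, by push_cast; ring, by simpa using hlen, ?_, ?_, ?_⟩
        · simp only [sp, if_neg hac, hps]
          simp [hps] at hlen2; simpa using hlen2
        · simp only [sp, if_neg hac, hps, List.headI, List.tail]
          rw [List.dropLast_cons_of_ne_nil hpsne, join_cons_head]
          rw [hps, List.dropLast_cons_of_ne_nil hpsne] at hjoin
          rw [hjoin]
          simp
        · simp only [sp, if_neg hac, hps, List.headI, List.tail, List.getLastD_cons]
          rw [getLastD_default_irrel ps hpsne (a :: p) p]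
          rw [hps, List.getLastD_cons] at hlast
          rw [hlast]
          simp [List.drop_succ_cons]

theorem fold_join (ps : List (List Char)) :
    ∀ (m : Nat), 1 ≤ m → m ≤ ps.length →
      (PySem.List.pyRange 0 (m : Int) 1).foldl
          (fun ret i => (if 0 < i then ret ++ ['_'] else ret) ++ PySem.List.pyGetD ps i []) []
        = PySem.Chars.join ['_'] (ps.take m) := by
  intro m
  induction m with
  | zero => intro h; omega
  | succ m ih =>
    intro _ hlen
    by_cases hm : m = 0
    · subst hm
      obtain ⟨x, xs, rfl⟩ : ∃ x xs, ps = x :: xs := by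
        cases ps with
        | nil => simp at hlen
        | cons x xs => exact ⟨x, xs, rfl⟩
      have h01 : PySem.List.pyRange 0 ((0 + 1 : Nat) : Int) 1 = [0] := by decide
      rw [h01]
      simp [PySem.List.pyGetD_of_nonneg, PySem.Chars.join_singleton]
    · have hm1 : 1 ≤ m := Nat.one_le_iff_ne_zero.mpr hm
      have hr : PySem.List.pyRange 0 ((m + 1 : Nat) : Int) 1
          = PySem.List.pyRange 0 (m : Int) 1 ++ [(m : Int)] := by
        rw [show ((m + 1 : Nat) : Int) = (m : Int) + 1 by push_cast; ring]
        exact PySem.List.pyRange_one_succ_right (by positivity)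
      rw [hr, List.foldl_append, ih hm1 (by omega)]
      have hmlt : m < ps.length := by omega
      have hget : PySem.List.pyGetD ps (m : Int) [] = ps[m] :=
        PySem.List.pyGetD_eq_getElem ps [] (by positivity) (by exact_mod_cast hmlt)
      have htake : ps.take (m + 1) = ps.take m ++ [ps[m]] := by
        rw [List.take_add_one]; simp [List.getElem?_eq_getElem hmlt]
      rw [htake, join_append_singleton _ _ _ (by
        intro h
        have := congrArg List.length h
        simp [Nat.min_eq_left (le_of_lt hmlt)] at this
        omega)]
      simp [hget, Nat.pos_of_ne_zero hm, List.append_assoc]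

theorem pyGetD_last (l : List (List Char)) (h : l ≠ []) :
    PySem.List.pyGetD l ((l.length : Int) - 1) [] = l.getLastD [] := by
  have hlen : 0 < l.length := List.length_pos_iff.mpr h
  rw [PySem.List.pyGetD_of_nonneg l [] (by omega)]
  have ht : ((l.length : Int) - 1).toNat = l.length - 1 := by omega
  rw [ht, List.getD_eq_getElem?_getD, List.getLastD_eq_getLast?, List.getLast?_eq_getElem?]

theorem shortName_eq (obj : String) :
    (objShortName obj).toList
      = obj.toList.drop ((PySem.Chars.rfind obj.toList ['|'] + 1).toNat) := by
  by_cases h : obj = ""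
  · subst h; simp [objShortName, rfind_nil]
  · rw [objShortName, if_neg h]
    simp only [splitOn_eq_sp]
    have hne := sp_ne_nil '|' obj.toList
    have hlen : 0 < (sp '|' obj.toList).length := List.length_pos_iff.mpr hne
    rw [if_neg (by exact_mod_cast (by omega : ¬ ((sp '|' obj.toList).length : Int) ≤ 0))]
    rw [String.toList_ofList, pyGetD_last _ hne]
    rcases rfind_sp_main '|' obj.toList with ⟨hr, hs⟩ | ⟨j, hj, _, _, _, hlast⟩
    · rw [hr, hs]; simp
    · rw [hj, hlast]
      congr 1

-- ===== VERDICT (by name: the statement is the Claim_ definition above) =====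
theorem objGetPrefix_spec : Claim_equal_objGetPrefix := by
  intro obj _
  unfold Spec_objGetPrefix objGetPrefix objGetPrefix_alt
  have hr1 : 0 ≤ PySem.Chars.rfind obj.toList ['|'] + 1 := by
    rcases rfind_sp_main '|' obj.toList with ⟨hr, _⟩ | ⟨j, hj, _, _, _, _⟩
    · omega
    · rw [hj]; omega
  have hshort : PySem.Chars.slice obj.toList (some (PySem.Chars.rfind obj.toList ['|'] + 1)) none
      = (objShortName obj).toList := by
    rw [shortName_eq, ← PySem.List.slice_from obj.toList hr1]
    rfl
  simp only [hshort]
  by_cases hobj : obj = ""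
  · subst hobj
    have : (objShortName "").toList = [] := by simp [objShortName]
    rw [if_pos rfl, this, rfind_nil, if_pos rfl]
  · rw [if_neg hobj]
    simp only [splitOn_eq_sp]
    set t := (objShortName obj).toList with ht
    rcases rfind_sp_main '_' t with ⟨hr, hs⟩ | ⟨j, hj, hjle, hlen2, hjoin, _⟩
    · rw [hr, if_pos rfl, hs]
      simp
    · have hjne : PySem.Chars.rfind t ['_'] ≠ -1 := by rw [hj]; omega
      rw [if_neg hjne]
      have hcnt : ¬ ((sp '_' t).length : Int) ≤ 1 := by exact_mod_cast (by omega : ¬ ((sp '_' t).length : Int) ≤ 1)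
      rw [if_neg hcnt]
      congr 1
      have hcast : ((sp '_' t).length : Int) - 1 = (((sp '_' t).length - 1 : Nat) : Int) := by omega
      rw [hcast, fold_join _ _ (by omega) (by omega)]
      rw [← List.dropLast_eq_take, hjoin, hj]
      rw [PySem.Chars.slice_eq_listSlice, PySem.List.slice_to t (by omega)]
      congr 1
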